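-- pv_equiv track=rewrite | github.com/IamGauravS/Data-Structures-And-Algorithms | google-prep-450/revision/two-pointer/907.sum-of-subarray-minimums.py | getNSE
-- ===== SOURCE A (Python) =====
-- def getNSE(arr):
--     output = [0]*len(arr)
--     stack = []
--
--     for i in range(len(arr)-1, -1, -1):
--         while stack and arr[stack[-1]] >= arr[i]:
--             stack.pop()
--         if not stack:
--             output[i] = len(arr)
--         else:
--             output[i] = stack[-1]
--
--         stack.append(i)
--
--     return output
-- ===== SOURCE B (Python) =====
-- def getNSE(arr):
--     n = len(arr)
--     output = [n] * n
--     stack = []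
--     for i, x in enumerate(arr):
--         while stack and arr[stack[-1]] > x:
--             output[stack.pop()] = i
--         stack.append(i)
--     return output
-- ===== Notes on version B (the rewrite author's own statement) =====
-- stated objective: alternative
-- what changed: Replaces A's right-to-left query-style monotonic stack (each i reads its answer off the stack top) with a left-to-right resolve-style scan that writes output[j]=i when j is popped, defaulting unresolved indices to len(arr).
import Mathlib
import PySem

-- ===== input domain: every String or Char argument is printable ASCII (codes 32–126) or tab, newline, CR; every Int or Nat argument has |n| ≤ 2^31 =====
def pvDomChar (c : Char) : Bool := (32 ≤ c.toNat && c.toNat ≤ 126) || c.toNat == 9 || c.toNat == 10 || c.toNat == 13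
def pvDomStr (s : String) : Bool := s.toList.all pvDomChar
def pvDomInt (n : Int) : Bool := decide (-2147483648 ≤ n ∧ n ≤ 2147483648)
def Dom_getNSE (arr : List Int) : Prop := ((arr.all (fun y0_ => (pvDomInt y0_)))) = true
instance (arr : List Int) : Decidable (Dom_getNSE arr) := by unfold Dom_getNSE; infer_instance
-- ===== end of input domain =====

-- B replaces A's right-to-left query-style monotonic stack with a left-to-right
-- resolve-style scan (pop j when arr[j] > arr[i] and write output[j] := i);
-- alternative decomposition, same O(n) cost. All list indices are provably in
-- range, so List.getD is exact for Python's arr[...] here.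

-- ===== PORT A =====
-- A's inner while loop: pop while stack nonempty and arr[stack[-1]] >= arr[i].
-- Stack is represented top-first (Python appends/pops at the end).
def popA (arr : List Int) (v : Int) : List Nat → List Nat
  | [] => []
  | j :: rest => if v ≤ arr.getD j 0 then popA arr v rest else j :: rest

-- A's for loop over range(len(arr)-1, -1, -1): structural countdown on i.
def loopA (arr : List Int) : Nat → List Int → List Nat → List Int
  | 0, out, _ => out
  | i + 1, out, stack =>
    loopA arr i
      (out.set i (match popA arr (arr.getD i 0) stack with
        | [] => (arr.length : Int)
        | j :: _ => (j : Int)))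
      (i :: popA arr (arr.getD i 0) stack)

def getNSE (arr : List Int) : List Int :=
  loopA arr arr.length (List.replicate arr.length 0) []

-- ===== PORT B =====
-- B's inner while loop: pop j while arr[j] > arr[i], writing output[j] := i.
def popB (arr : List Int) (i : Nat) : List Nat → List Int → List Nat × List Int
  | [], out => ([], out)
  | j :: rest, out =>
    if arr.getD i 0 < arr.getD j 0 then popB arr i rest (out.set j (i : Int))
    else (j :: rest, out)

-- one iteration of B's for loop (state = (stack, output))
def stepB (arr : List Int) (st : List Nat × List Int) (i : Nat) : List Nat × List Int :=
  let p := popB arr i st.1 st.2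
  (i :: p.1, p.2)

def getNSE_alt (arr : List Int) : List Int :=
  let n := arr.length
  ((List.range n).foldl (stepB arr) ([], List.replicate n (n : Int))).2

-- ===== PRECONDITION & SPEC =====
def Spec_getNSE (arr : List Int) (out : List Int) : Prop := out = getNSE_alt arr
instance (arr : List Int) (out : List Int) : Decidable (Spec_getNSE arr out) := by unfold Spec_getNSE; infer_instance

-- ===== CLAIM (what is proved, stated in full; the proofs are below) =====
def Claim_equal_getNSE : Prop := ∀ (arr : List Int), Dom_getNSE arr → Spec_getNSE arr (getNSE arr)

-- ===== LEMMAS AND PROOFS =====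

-- the common specification: first index j ≥ start with arr[j] < v, else arr.length
def firstLt (arr : List Int) (v : Int) (j : Nat) : Nat :=
  if h : j < arr.length then
    if arr.getD j 0 < v then j else firstLt arr v (j + 1)
  else arr.length
termination_by arr.length - j

def specNSE (arr : List Int) (i : Nat) : Int := (firstLt arr (arr.getD i 0) (i + 1) : Int)

lemma firstLt_char (arr : List Int) (v : Int) (j : Nat) :
    (firstLt arr v j = arr.length ∧ ∀ m, j ≤ m → m < arr.length → v ≤ arr.getD m 0) ∨
    (j ≤ firstLt arr v j ∧ firstLt arr v j < arr.length ∧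
      arr.getD (firstLt arr v j) 0 < v ∧
      ∀ m, j ≤ m → m < firstLt arr v j → v ≤ arr.getD m 0) := by
  by_cases h : j < arr.length
  · by_cases hv : arr.getD j 0 < v
    · right
      rw [firstLt, dif_pos h, if_pos hv]
      exact ⟨le_refl _, h, hv, fun m hm hm' => absurd (lt_of_le_of_lt hm hm') (lt_irrefl _)⟩
    · have heq : firstLt arr v j = firstLt arr v (j + 1) := by
        rw [firstLt, dif_pos h, if_neg hv]
      rcases firstLt_char arr v (j + 1) with ⟨h1, h2⟩ | ⟨h1, h2, h3, h4⟩
      · left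
        refine ⟨heq ▸ h1, fun m hm hm' => ?_⟩
        rcases Nat.eq_or_lt_of_le hm with rfl | hlt
        · exact le_of_not_gt hv
        · exact h2 m hlt hm'
      · right
        refine ⟨heq ▸ le_trans (Nat.le_succ j) h1, heq ▸ h2, heq ▸ h3, fun m hm hm' => ?_⟩
        rcases Nat.eq_or_lt_of_le hm with rfl | hlt
        · exact le_of_not_gt hv
        · exact h4 m hlt (heq ▸ hm')
  · left
    rw [firstLt, dif_neg h]
    exact ⟨rfl, fun m hm hm' => absurd hm' (fun hh => h (Nat.lt_of_le_of_lt hm hh))⟩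
termination_by arr.length - j

lemma firstLt_eq_len (arr : List Int) (v : Int) (j : Nat)
    (h : ∀ m, j ≤ m → m < arr.length → v ≤ arr.getD m 0) : firstLt arr v j = arr.length := by
  rcases firstLt_char arr v j with ⟨h1, _⟩ | ⟨h1, h2, h3, _⟩
  · exact h1
  · exact absurd (h _ h1 h2) (not_le.mpr h3)

-- A's invariant predicate for stack membership over the suffix [i, n)
def Keep (arr : List Int) (i j : Nat) : Prop :=
  i ≤ j ∧ j < arr.length ∧ ∀ k, i ≤ k → k < j → arr.getD j 0 < arr.getD k 0

lemma popA_split (arr : List Int) (v : Int) : ∀ stack : List Nat,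
    ∃ p, stack = p ++ popA arr v stack ∧ (∀ x ∈ p, v ≤ arr.getD x 0) ∧
      (∀ j r, popA arr v stack = j :: r → arr.getD j 0 < v)
  | [] => ⟨[], by simp [popA]⟩
  | j :: rest => by
    by_cases h : v ≤ arr.getD j 0
    · obtain ⟨p, hp1, hp2, hp3⟩ := popA_split arr v rest
      have hpa : popA arr v (j :: rest) = popA arr v rest := by
        simp only [popA]; rw [if_pos h]
      refine ⟨j :: p, ?_, ?_, ?_⟩
      · rw [hpa, List.cons_append]; exact congrArg _ hp1
      · intro x hx; rcases List.mem_cons.mp hx with rfl | hx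
        · exact h
        · exact hp2 x hx
      · intro j' r' he; exact hp3 j' r' (hpa ▸ he)
    · have hpa : popA arr v (j :: rest) = j :: rest := by
        simp only [popA]; rw [if_neg h]
      refine ⟨[], by rw [hpa]; rfl, by simp, ?_⟩
      intro j' r' he
      rw [hpa] at he
      injection he with h1 _
      subst h1
      exact lt_of_not_ge h

-- the main A-side loop invariant
lemma loopA_eq (arr : List Int) : ∀ (i : Nat) (out : List Int) (stack : List Nat),
    i ≤ arr.length → out.length = arr.length →
    stack.Pairwise (· < ·) → (∀ j, j ∈ stack ↔ Keep arr i j) →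
    loopA arr i out stack = (List.range i).map (specNSE arr) ++ out.drop i
  | 0, out, stack, _, _, _, _ => by simp [loopA]
  | i + 1, out, stack, hin, hlen, hpw, hmem => by
    have hi : i < arr.length := hin
    set v := arr.getD i 0 with hv
    set stack' := popA arr v stack with hst
    obtain ⟨p, hsplit, hpge, hhd⟩ := popA_split arr v stack
    -- every element of stack' is in stack
    have hsub : ∀ x ∈ stack', x ∈ stack := by
      intro x hx; rw [hsplit]; exact List.mem_append_right _ (hst ▸ hx)
    -- elements of stack' have value < v
    have hspw : stack'.Pairwise (· < ·) := by
      have := hpw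
      rw [hsplit] at this
      exact hst ▸ (List.pairwise_append.mp this).2.1
    have hlt' : ∀ x ∈ stack', arr.getD x 0 < v := by
      intro x hx
      cases he : stack' with
      | nil => rw [he] at hx; exact absurd hx (List.not_mem_nil)
      | cons h0 r0 =>
        have hh0 : arr.getD h0 0 < v := hhd h0 r0 (hst.symm.trans he)
        rw [he] at hx
        rcases List.mem_cons.mp hx with rfl | hx'
        · exact hh0
        · have hxs : x ∈ stack' := by rw [he]; exact List.mem_cons_of_mem _ hx'
          have hkx : Keep arr (i + 1) x := (hmem x).mp (hsub x hxs)
          have hpw' : (h0 :: r0).Pairwise (· < ·) := he ▸ hspw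
          have hh0x : h0 < x := (List.pairwise_cons.mp hpw').1 x hx'
          have hkh0 : Keep arr (i + 1) h0 := (hmem h0).mp (hsub h0 (by rw [he]; exact List.mem_cons_self))
          exact lt_trans (hkx.2.2 h0 hkh0.1 hh0x) hh0
    -- head of stack' is the value specNSE arr i
    have hheadAux : ∀ l : List Nat, l = stack' → (match l with
        | [] => (arr.length : Int)
        | j :: _ => (j : Int)) = specNSE arr i := by
      intro l hl
      cases l with
      | nil =>
        have he : stack' = [] := hl.symm
        have hall : ∀ x ∈ stack, v ≤ arr.getD x 0 := by
          intro x hx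
          rw [hsplit, ← hst, he, List.append_nil] at hx
          exact hpge x hx
        have : firstLt arr v (i + 1) = arr.length := by
          apply firstLt_eq_len
          intro m hm hmn
          by_contra hc
          push Not at hc
          -- take f := firstLt arr v (i+1); it is a Keep element with value < v
          rcases firstLt_char arr v (i + 1) with ⟨h1, h2⟩ | ⟨h1, h2, h3, h4⟩
          · exact absurd (h2 m hm hmn) (not_le.mpr hc)
          · set f := firstLt arr v (i + 1) with hf
            have hkf : Keep arr (i + 1) f := ⟨h1, h2, fun k hk hk' => lt_of_lt_of_le h3 (h4 k hk hk')⟩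
            exact absurd (hall f ((hmem f).mpr hkf)) (not_le.mpr h3)
        show (arr.length : Int) = specNSE arr i
        simp only [specNSE]
        rw [← hv, this]
      | cons j r =>
        have he : stack' = j :: r := hl.symm
        have hj : arr.getD j 0 < v := hhd j r (hst.symm.trans he)
        have hjmem : j ∈ stack := hsub j (by rw [he]; exact List.mem_cons_self)
        have hkj : Keep arr (i + 1) j := (hmem j).mp hjmem
        rcases firstLt_char arr v (i + 1) with ⟨_, h2⟩ | ⟨h1, h2, h3, h4⟩
        · exact absurd (h2 j hkj.1 hkj.2.1) (not_le.mpr hj)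
        · set f := firstLt arr v (i + 1) with hf
          have hfj : f ≤ j := by
            by_contra hc
            push Not at hc
            exact absurd (h4 j hkj.1 hc) (not_le.mpr hj)
          have hkf : Keep arr (i + 1) f := ⟨h1, h2, fun k hk hk' => lt_of_lt_of_le h3 (h4 k hk hk')⟩
          have hfmem : f ∈ stack := (hmem f).mpr hkf
          have hfst' : f ∈ stack' := by
            rw [hsplit, ← hst] at hfmem
            rcases List.mem_append.mp hfmem with hfp | hfs
            · exact absurd (hpge f hfp) (not_le.mpr h3)
            · exact hfs
          have hfj' : f = j := by
            rw [he] at hfst'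
            rcases List.mem_cons.mp hfst' with rfl | hfr
            · rfl
            · have hpw' : (j :: r).Pairwise (· < ·) := he ▸ hspw
              exact absurd ((List.pairwise_cons.mp hpw').1 f hfr) (not_lt.mpr hfj)
          show (j : Int) = specNSE arr i
          simp only [specNSE]
          rw [← hv, ← hf, hfj']
    have hhead := hheadAux stack' rfl
    -- the new stack's invariant at i
    have hgt : ∀ x ∈ stack', i < x := by
      intro x hx
      exact Nat.lt_of_succ_le ((hmem x).mp (hsub x hx)).1
    have hpw2 : (i :: stack').Pairwise (· < ·) := List.pairwise_cons.mpr ⟨hgt, hspw⟩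
    have hmem2 : ∀ j, j ∈ i :: stack' ↔ Keep arr i j := by
      intro j
      constructor
      · intro hj
        rcases List.mem_cons.mp hj with rfl | hj'
        · exact ⟨le_refl _, hi, fun k hk hk' => absurd (lt_of_le_of_lt hk hk') (lt_irrefl _)⟩
        · have hkj : Keep arr (i + 1) j := (hmem j).mp (hsub j hj')
          refine ⟨le_trans (Nat.le_succ i) hkj.1, hkj.2.1, fun k hk hk' => ?_⟩
          rcases Nat.eq_or_lt_of_le hk with rfl | hlt
          · exact hlt' j hj'
          · exact hkj.2.2 k hlt hk'
      · intro hkj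
        rcases Nat.eq_or_lt_of_le hkj.1 with rfl | hlt
        · exact List.mem_cons_self
        · have hkj' : Keep arr (i + 1) j := ⟨hlt, hkj.2.1, fun k hk hk' => hkj.2.2 k (le_trans (Nat.le_succ i) hk) hk'⟩
          have hjst : j ∈ stack := (hmem j).mpr hkj'
          have hjv : arr.getD j 0 < v := hkj.2.2 i (le_refl _) hlt
          refine List.mem_cons_of_mem _ ?_
          rw [hsplit, ← hst] at hjst
          rcases List.mem_append.mp hjst with hjp | hjs
          · exact absurd (hpge j hjp) (not_le.mpr hjv)
          · exact hjs
    have hrec := loopA_eq arr i (out.set i (specNSE arr i)) (i :: stack')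
      (le_of_lt hi) (by simp [hlen]) hpw2 hmem2
    calc loopA arr (i + 1) out stack
        = loopA arr i (out.set i (specNSE arr i)) (i :: stack') := by
          rw [loopA, ← hv, ← hst, hhead]
      _ = (List.range i).map (specNSE arr) ++ (out.set i (specNSE arr i)).drop i := hrec
      _ = (List.range (i + 1)).map (specNSE arr) ++ out.drop (i + 1) := by
          have hiout : i < out.length := by omega
          have hdrop : (out.set i (specNSE arr i)).drop i = specNSE arr i :: out.drop (i + 1) := by
            rw [List.drop_eq_getElem_cons (by simpa using hiout),
              List.getElem_set_self (by simpa using hiout)]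
            congr 1
            rw [List.drop_set]
            simp
          rw [hdrop, List.range_succ, List.map_append]
          simp

lemma getNSE_eq_spec (arr : List Int) :
    getNSE arr = (List.range arr.length).map (specNSE arr) := by
  have h := loopA_eq arr arr.length (List.replicate arr.length 0) []
    (le_refl _) (by simp) (by simp) (by
      intro j
      simp only [List.not_mem_nil, false_iff]
      intro hk
      exact absurd hk.2.1 (not_lt.mpr hk.1))
  simpa [getNSE] using h

-- ===== B side =====

-- B's invariant predicate for stack membership after processing [0, i)
def KeepB (arr : List Int) (i j : Nat) : Prop :=
  j < i ∧ ∀ k, j < k → k < i → arr.getD j 0 ≤ arr.getD k 0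

lemma popB_split (arr : List Int) (i : Nat) : ∀ (stack : List Nat) (out : List Int),
    (∀ x ∈ stack, x < out.length) →
    ∃ p, stack = p ++ (popB arr i stack out).1 ∧
      (∀ x ∈ p, arr.getD i 0 < arr.getD x 0) ∧
      (∀ j r, (popB arr i stack out).1 = j :: r → arr.getD j 0 ≤ arr.getD i 0) ∧
      (popB arr i stack out).2.length = out.length ∧
      (∀ k, (popB arr i stack out).2.getD k 0 = if k ∈ p then (i : Int) else out.getD k 0)
  | [], out, _ => ⟨[], by simp [popB]⟩
  | j :: rest, out, hbnd => by
    by_cases h : arr.getD i 0 < arr.getD j 0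
    · have hpb : popB arr i (j :: rest) out = popB arr i rest (out.set j (i : Int)) := by
        simp only [popB]; rw [if_pos h]
      have hb' : ∀ x ∈ rest, x < (out.set j (i : Int)).length := by
        intro x hx; simpa using hbnd x (List.mem_cons_of_mem _ hx)
      obtain ⟨p, hp1, hp2, hp3, hp4, hp5⟩ := popB_split arr i rest (out.set j (i : Int)) hb'
      refine ⟨j :: p, ?_, ?_, ?_, ?_, ?_⟩
      · rw [hpb, List.cons_append]; exact congrArg _ hp1
      · intro x hx; rcases List.mem_cons.mp hx with rfl | hx
        · exact h
        · exact hp2 x hx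
      · intro j' r' he; exact hp3 j' r' (by rw [hpb] at he; exact he)
      · rw [hpb, hp4]; simp
      · intro k
        rw [hpb, hp5 k]
        by_cases hk : k ∈ p
        · simp [hk]
        · simp only [hk, if_false, List.mem_cons]
          by_cases hkj : k = j
          · subst hkj
            have hklen : k < out.length := hbnd k List.mem_cons_self
            simp [List.getD_eq_getElem?_getD, hklen]
          · simp [hkj, List.getD_eq_getElem?_getD, List.getElem?_set_ne (fun hh => hkj hh.symm)]
    · have hpb : popB arr i (j :: rest) out = (j :: rest, out) := by
        simp only [popB]; rw [if_neg h]
      refine ⟨[], by simp [hpb], by simp, ?_, by simp [hpb], by simp [hpb]⟩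
      intro j' r' he
      rw [hpb] at he
      injection he with h1 _
      subst h1
      exact le_of_not_gt h

-- specNSE value for an index popped at step i
lemma spec_of_popped (arr : List Int) (i j : Nat) (hi : i < arr.length)
    (hk : KeepB arr i j) (hlt : arr.getD i 0 < arr.getD j 0) :
    specNSE arr j = (i : Int) := by
  have : firstLt arr (arr.getD j 0) (j + 1) = i := by
    rcases firstLt_char arr (arr.getD j 0) (j + 1) with ⟨_, h2⟩ | ⟨h1, h2, h3, h4⟩
    · exact absurd (h2 i hk.1 hi) (not_le.mpr hlt)
    · set f := firstLt arr (arr.getD j 0) (j + 1) with hf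
      rcases Nat.lt_trichotomy f i with hfi | hfi | hfi
      · exact absurd (hk.2 f h1 hfi) (not_le.mpr h3)
      · exact hfi
      · exact absurd (h4 i hk.1 hfi) (not_le.mpr hlt)
  simp only [specNSE]
  rw [this]

-- specNSE value for an index never popped
lemma spec_of_survivor (arr : List Int) (j : Nat)
    (hk : KeepB arr arr.length j) : specNSE arr j = (arr.length : Int) := by
  have : firstLt arr (arr.getD j 0) (j + 1) = arr.length :=
    firstLt_eq_len _ _ _ (fun m hm hm' => hk.2 m hm hm')
  simp only [specNSE]
  rw [this]

-- the main B-side fold invariant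
lemma foldB_inv (arr : List Int) : ∀ i : Nat, i ≤ arr.length →
    (((List.range i).foldl (stepB arr) ([], List.replicate arr.length (arr.length : Int))).1.Pairwise (· > ·)) ∧
    (∀ j, j ∈ ((List.range i).foldl (stepB arr) ([], List.replicate arr.length (arr.length : Int))).1 ↔ KeepB arr i j) ∧
    ((List.range i).foldl (stepB arr) ([], List.replicate arr.length (arr.length : Int))).2.length = arr.length ∧
    (∀ k, ((List.range i).foldl (stepB arr) ([], List.replicate arr.length (arr.length : Int))).2.getD k 0 =
      if k < i ∧ k ∉ ((List.range i).foldl (stepB arr) ([], List.replicate arr.length (arr.length : Int))).1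
      then specNSE arr k else (List.replicate arr.length (arr.length : Int)).getD k 0)
  | 0, _ => by
    refine ⟨by simp, ?_, by simp, by simp⟩
    intro j
    simp only [List.range_zero, List.foldl_nil, List.not_mem_nil, false_iff]
    intro hk; exact absurd hk.1 (Nat.not_lt_zero j)
  | i + 1, hin => by
    have hi : i < arr.length := hin
    obtain ⟨hpw, hmem, hlen, hout⟩ := foldB_inv arr i (le_of_lt hi)
    set st := ((List.range i).foldl (stepB arr) ([], List.replicate arr.length (arr.length : Int))) with hstdef
    have hstep : (List.range (i + 1)).foldl (stepB arr) ([], List.replicate arr.length (arr.length : Int)) =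
        stepB arr st i := by
      rw [List.range_succ, List.foldl_append, List.foldl_cons, List.foldl_nil]
    have hbnd : ∀ x ∈ st.1, x < st.2.length := by
      intro x hx
      have := ((hmem x).mp hx).1
      omega
    obtain ⟨p, hp1, hp2, hp3, hp4, hp5⟩ := popB_split arr i st.1 st.2 hbnd
    set res := (popB arr i st.1 st.2).1 with hres
    have hnew : stepB arr st i = (i :: res, (popB arr i st.1 st.2).2) := rfl
    have hsub : ∀ x ∈ res, x ∈ st.1 := by
      intro x hx; rw [hp1]; exact List.mem_append_right _ hx
    have hlti : ∀ x ∈ st.1, x < i := fun x hx => ((hmem x).mp hx).1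
    have hrespw : res.Pairwise (· > ·) := by
      rw [hp1] at hpw; exact (List.pairwise_append.mp hpw).2.1
    -- elements of res have value ≤ arr[i]
    have hle' : ∀ x ∈ res, arr.getD x 0 ≤ arr.getD i 0 := by
      intro x hx
      cases he : res with
      | nil => rw [he] at hx; exact absurd hx (List.not_mem_nil)
      | cons h0 r0 =>
        have hh0 : arr.getD h0 0 ≤ arr.getD i 0 := hp3 h0 r0 (hres.symm.trans he)
        rw [he] at hx
        rcases List.mem_cons.mp hx with rfl | hx'
        · exact hh0
        · have hxs : x ∈ res := by rw [he]; exact List.mem_cons_of_mem _ hx'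
          have hpw' : (h0 :: r0).Pairwise (· > ·) := he ▸ hrespw
          have hxh0 : x < h0 := (List.pairwise_cons.mp hpw').1 x hx'
          have hkx : KeepB arr i x := (hmem x).mp (hsub x hxs)
          have hh0i : h0 < i := hlti h0 (hsub h0 (by rw [he]; exact List.mem_cons_self))
          exact le_trans (hkx.2 h0 hxh0 hh0i) hh0
    refine ⟨?_, ?_, ?_, ?_⟩
    · rw [hstep, hnew]
      exact List.pairwise_cons.mpr ⟨fun x hx => hlti x (hsub x hx), hrespw⟩
    · intro j
      rw [hstep, hnew]
      constructor
      · intro hj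
        rcases List.mem_cons.mp hj with rfl | hj'
        · exact ⟨Nat.lt_succ_self _, fun k hk hk' => absurd hk' (by omega)⟩
        · have hkj : KeepB arr i j := (hmem j).mp (hsub j hj')
          refine ⟨Nat.lt_succ_of_lt hkj.1, fun k hk hk' => ?_⟩
          rcases Nat.lt_succ_iff_lt_or_eq.mp hk' with hki | rfl
          · exact hkj.2 k hk hki
          · exact hle' j hj'
      · intro hkj
        rcases Nat.lt_succ_iff_lt_or_eq.mp hkj.1 with hji | rfl
        · have hkj' : KeepB arr i j := ⟨hji, fun k hk hk' => hkj.2 k hk (Nat.lt_succ_of_lt hk')⟩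
          have hjst : j ∈ st.1 := (hmem j).mpr hkj'
          have hjv : arr.getD j 0 ≤ arr.getD i 0 := hkj.2 i hji (Nat.lt_succ_self _)
          refine List.mem_cons_of_mem _ ?_
          rw [hp1] at hjst
          rcases List.mem_append.mp hjst with hjp | hjs
          · exact absurd (hp2 j hjp) (not_lt.mpr hjv)
          · exact hjs
        · exact List.mem_cons_self
    · rw [hstep, hnew]; simpa using hp4 ▸ hlen
    · intro k
      rw [hstep, hnew]
      simp only
      rw [hp5 k]
      by_cases hkp : k ∈ p
      · -- popped at step i: value becomes i = specNSE arr k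
        have hkst : k ∈ st.1 := hp1 ▸ List.mem_append_left _ hkp
        have hkk : KeepB arr i k := (hmem k).mp hkst
        have hknres : k ∉ res := by
          intro hc
          have hnd : st.1.Nodup := List.Pairwise.imp (fun h => Nat.ne_of_gt h) hpw
          rw [hp1] at hnd
          exact (List.disjoint_of_nodup_append hnd) hkp hc
        have hcond : k < i + 1 ∧ k ∉ i :: res := by
          refine ⟨Nat.lt_succ_of_lt hkk.1, ?_⟩
          intro hc
          rcases List.mem_cons.mp hc with rfl | hc'
          · exact absurd hkk.1 (lt_irrefl _)
          · exact hknres hc'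
        rw [if_pos hkp, if_pos hcond, spec_of_popped arr i k hi hkk (hp2 k hkp)]
      · rw [if_neg hkp, hout k]
        by_cases hks : k ∈ st.1
        · -- still on the stack (k ∈ res): untouched, not resolved
          have hkres : k ∈ res := by
            rw [hp1] at hks
            rcases List.mem_append.mp hks with h | h
            · exact absurd h hkp
            · exact h
          have h1 : ¬(k < i ∧ k ∉ st.1) := fun h => h.2 hks
          have h2 : ¬(k < i + 1 ∧ k ∉ i :: res) := fun h => h.2 (List.mem_cons_of_mem _ hkres)
          rw [if_neg h1, if_neg h2]
        · by_cases hki : k < i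
          · have h1 : k < i ∧ k ∉ st.1 := ⟨hki, hks⟩
            have h2 : k < i + 1 ∧ k ∉ i :: res := by
              refine ⟨Nat.lt_succ_of_lt hki, fun hc => ?_⟩
              rcases List.mem_cons.mp hc with rfl | hc'
              · exact absurd hki (lt_irrefl _)
              · exact hks (hsub k hc')
            rw [if_pos h1, if_pos h2]
          · have h1 : ¬(k < i ∧ k ∉ st.1) := fun h => hki h.1
            have h2 : ¬(k < i + 1 ∧ k ∉ i :: res) := by
              intro h
              rcases Nat.lt_succ_iff_lt_or_eq.mp h.1 with h' | rfl
              · exact hki h'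
              · exact h.2 List.mem_cons_self
            rw [if_neg h1, if_neg h2]

lemma getNSE_alt_eq_spec (arr : List Int) :
    getNSE_alt arr = (List.range arr.length).map (specNSE arr) := by
  obtain ⟨hpw, hmem, hlen, hout⟩ := foldB_inv arr arr.length (le_refl _)
  set st := ((List.range arr.length).foldl (stepB arr) ([], List.replicate arr.length (arr.length : Int))) with hstdef
  have halt : getNSE_alt arr = st.2 := rfl
  have hfin : ∀ k, k < arr.length → st.2.getD k 0 = specNSE arr k := by
    intro k hk
    rw [hout k]
    by_cases hks : k ∈ st.1
    · have h1 : ¬(k < arr.length ∧ k ∉ st.1) := fun h => h.2 hks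
      rw [if_neg h1, spec_of_survivor arr k ((hmem k).mp hks)]
      simp [List.getD_eq_getElem?_getD, hk]
    · rw [if_pos ⟨hk, hks⟩]
  rw [halt]
  apply List.ext_getElem
  · simp [hlen]
  · intro k h1 h2
    have hkn : k < arr.length := by omega
    have hklen : k < st.2.length := by omega
    have h := hfin k hkn
    rw [List.getD_eq_getElem?_getD, List.getElem?_eq_getElem hklen] at h
    simp only [Option.getD_some] at h
    simp only [List.getElem_map, List.getElem_range]
    exact h

-- ===== VERDICT (by name: the statement is the Claim_ definition above) =====
theorem getNSE_spec : Claim_equal_getNSE := by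
  intro arr _
  unfold Spec_getNSE
  rw [getNSE_eq_spec, getNSE_alt_eq_spec]
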